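-- pv_equiv track=rewrite | github.com/c-jimmy1/CS1 | Homework/HW/Hw 5/hw5_part2.py | global_max
-- ===== SOURCE A (Python) =====
-- def global_max(grid_list):
--     temp = 0 #temporary value that gets added on to record the max
--     row = 0
--     col = 0
--     for x in grid_list:
--         for y in x:
--             if y > temp:
--                 temp = y #if the value is greater than the previous replace it as it is larger (last num is the max)
--
--     for x in grid_list:
--         for y in x:
--             if y == temp: #if the value is equal to the max...
--                 coord = (row, col)
--             col += 1 #adds the column to when it is the max
--         col = 0 #resets for the loop
--         row += 1 #adds the row to when it is the max
--     return coord, temp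
-- ===== SOURCE B (Python) =====
-- def global_max(grid_list):
--     temp = 0
--     for row, x in enumerate(grid_list):
--         for col, y in enumerate(x):
--             if y >= temp:
--                 temp = y
--                 coord = (row, col)
--     return coord, temp
-- ===== Notes on version B (the rewrite author's own statement) =====
-- stated objective: simpler
-- what changed: Merged A's two full grid passes (one to find the max, one to find its last coordinate) into a single enumerate-driven pass that keeps a running max with >= so the last coordinate of the global max wins.
-- outside the precondition, e.g. on global_max([[-3, -1]]): A raises UnboundLocalError, B raises UnboundLocalError
import Mathlib
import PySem

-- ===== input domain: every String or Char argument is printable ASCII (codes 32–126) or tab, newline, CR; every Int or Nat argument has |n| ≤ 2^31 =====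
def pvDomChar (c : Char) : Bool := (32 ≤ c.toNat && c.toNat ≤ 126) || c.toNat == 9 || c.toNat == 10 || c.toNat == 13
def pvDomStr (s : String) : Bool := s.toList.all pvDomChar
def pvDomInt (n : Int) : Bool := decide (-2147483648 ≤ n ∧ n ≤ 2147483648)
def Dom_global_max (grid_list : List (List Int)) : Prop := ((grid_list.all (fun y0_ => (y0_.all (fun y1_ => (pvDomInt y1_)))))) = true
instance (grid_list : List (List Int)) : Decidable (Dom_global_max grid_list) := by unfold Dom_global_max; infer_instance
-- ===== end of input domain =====

-- B merges A's two full passes into one enumerate-driven pass (running max with `>=`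
-- keeping the last coordinate); objective: simpler. Both raise (port: unbound coord,
-- modelled as Option) when no entry is ≥ 0 — those inputs are outside Pre_.

-- ===== PORT A =====
-- A-side helpers: the loop bodies of A's two passes, named so the proofs can speak about them.
def vstep (t y : Int) : Int := if y > t then y else t
def a1 (t : Int) (x : List Int) : Int := x.foldl vstep t
-- second pass, state (row, col, coord); coord = none models Python's unbound `coord`
def innerA (temp : Int) (p : Int × Int × Option (Int × Int)) (y : Int) :
    Int × Int × Option (Int × Int) :=
  (p.1, p.2.1 + 1, if y == temp then some (p.1, p.2.1) else p.2.2)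
def outerA (temp : Int) (s : Int × Int × Option (Int × Int)) (x : List Int) :
    Int × Int × Option (Int × Int) :=
  let s2 := x.foldl (innerA temp) s
  (s2.1 + 1, 0, s2.2.2)

def global_max (grid_list : List (List Int)) : (Int × Int) × Int :=
  let temp := grid_list.foldl a1 0
  let s := grid_list.foldl (outerA temp) (0, 0, none)
  (s.2.2.getD (0, 0), temp)

-- ===== PORT B =====
-- B-side helper: the single-pass step (running max with >=, last coordinate wins)
def bstep (s : Int × Option (Int × Int)) (p : (Int × Int) × Int) : Int × Option (Int × Int) :=
  if p.2 ≥ s.1 then (p.2, some p.1) else s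

def global_max_alt (grid_list : List (List Int)) : (Int × Int) × Int :=
  let s := (PySem.List.enumerate grid_list 0).foldl
    (fun s rx => (PySem.List.enumerate rx.2 0).foldl
      (fun s cy => bstep s ((rx.1, cy.1), cy.2)) s)
    (0, none)
  (s.2.getD (0, 0), s.1)

-- ===== PRECONDITION & SPEC =====
-- Pre_ excludes exactly the inputs (no entry ≥ 0: all-negative or empty grids) on which
-- Python A raises UnboundLocalError (`coord` never assigned); Python B raises there too.
def Pre_global_max (grid_list : List (List Int)) : Prop :=
  ∃ x ∈ grid_list, ∃ y ∈ x, 0 ≤ y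
instance (grid_list : List (List Int)) : Decidable (Pre_global_max grid_list) := by
  unfold Pre_global_max; infer_instance
def pvWitness_global_max : List (List Int) := [[1, -2], [3, 1]]

def Spec_global_max (grid_list : List (List Int)) (out : (Int × Int) × Int) : Prop := out = global_max_alt grid_list
instance (grid_list : List (List Int)) (out : (Int × Int) × Int) : Decidable (Spec_global_max grid_list out) := by unfold Spec_global_max; infer_instance

-- ===== CLAIM (what is proved, stated in full; the proofs are below) =====
def Claim_equal_global_max : Prop := ∀ (grid_list : List (List Int)), Dom_global_max grid_list → Pre_global_max grid_list → Spec_global_max grid_list (global_max grid_list)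

-- ===== LEMMAS AND PROOFS =====

-- flat view of the grid in row-major order, with the coordinates both programs compute
def rowFlat (r c : Int) : List Int → List ((Int × Int) × Int)
  | [] => []
  | y :: x => ((r, c), y) :: rowFlat r (c + 1) x

def gridFlat (r : Int) : List (List Int) → List ((Int × Int) × Int)
  | [] => []
  | x :: g => rowFlat r 0 x ++ gridFlat (r + 1) g

lemma a1_le (l : List Int) (t : Int) : t ≤ a1 t l := by
  induction l generalizing t with
  | nil => simp [a1]
  | cons y l ih =>
    have h1 : t ≤ vstep t y := by unfold vstep; split <;> omega
    have h2 := ih (vstep t y)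
    simpa [a1] using le_trans h1 h2

lemma a1_attained (l : List Int) (t : Int) : a1 t l = t ∨ a1 t l ∈ l := by
  induction l generalizing t with
  | nil => simp [a1]
  | cons y l ih =>
    have : a1 t (y :: l) = a1 (vstep t y) l := by simp [a1, List.foldl]
    rw [this]
    rcases ih (vstep t y) with h | h
    · have hv : vstep t y = y ∨ vstep t y = t := by
        unfold vstep; split
        · exact Or.inl rfl
        · exact Or.inr rfl
      rcases hv with hv | hv <;> rw [hv] at h ⊢
      · right; rw [h]; simp
      · left; exact h
    · right; exact List.mem_cons_of_mem _ h

def a2s (m : Int) (co : Option (Int × Int)) (p : (Int × Int) × Int) : Option (Int × Int) :=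
  if p.2 == m then some p.1 else co

lemma a2_indep (l : List ((Int × Int) × Int)) (m : Int)
    (h : ∃ p ∈ l, p.2 = m) (co co' : Option (Int × Int)) :
    l.foldl (a2s m) co = l.foldl (a2s m) co' := by
  induction l generalizing co co' with
  | nil => simp at h
  | cons p l ih =>
    simp only [List.foldl]
    by_cases hp : p.2 = m
    · simp [a2s, hp]
    · rcases h with ⟨q, hq, hqm⟩
      rcases List.mem_cons.mp hq with rfl | hq'
      · exact absurd hqm hp
      · exact ih ⟨q, hq', hqm⟩ _ _

-- the key lemma: B's single pass computes A's two passes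
lemma key (l : List ((Int × Int) × Int)) (t : Int) (co : Option (Int × Int)) :
    l.foldl bstep (t, co) =
      (a1 t (l.map Prod.snd), l.foldl (a2s (a1 t (l.map Prod.snd))) co) := by
  induction l generalizing t co with
  | nil => simp [a1]
  | cons p l ih =>
    have hmap : (p :: l).map Prod.snd = p.2 :: l.map Prod.snd := by simp
    have ha1 : a1 t ((p :: l).map Prod.snd) = a1 (vstep t p.2) (l.map Prod.snd) := by
      simp [a1]
    by_cases h : p.2 ≥ t
    · have hv : vstep t p.2 = p.2 := by unfold vstep; split <;> omega
      have hstep : bstep (t, co) p = (p.2, some p.1) := by simp [bstep, h]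
      simp only [List.foldl, hstep, ih, ha1, hv]
      set M := a1 p.2 (l.map Prod.snd) with hM
      have : l.foldl (a2s M) (a2s M co p) = l.foldl (a2s M) (some p.1) := by
        by_cases hpm : p.2 = M
        · simp [a2s, hpm]
        · rcases a1_attained (l.map Prod.snd) p.2 with hA | hA
          · exact absurd (show p.2 = M by rw [hM, hA]) hpm
          · rcases List.mem_map.mp (hM ▸ hA) with ⟨q, hq, hqm⟩
            exact a2_indep l M ⟨q, hq, hqm⟩ _ _
      rw [← this]
    · have hv : vstep t p.2 = t := by unfold vstep; split <;> omega
      have hstep : bstep (t, co) p = (t, co) := by simp [bstep, h]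
      simp only [List.foldl, hstep, ih, ha1, hv]
      have hle : t ≤ a1 t (l.map Prod.snd) := a1_le _ _
      have : a2s (a1 t (l.map Prod.snd)) co p = co := by
        unfold a2s; simp only [beq_iff_eq]; split
        · omega
        · rfl
      rw [this]

-- A's first pass over the grid = a1 over the flat values
lemma rowFlat_map_snd (x : List Int) (r c : Int) : (rowFlat r c x).map Prod.snd = x := by
  induction x generalizing c with
  | nil => simp [rowFlat]
  | cons y x ih => simp [rowFlat, ih]

lemma gridFlat_map_snd (g : List (List Int)) (r : Int) :
    (gridFlat r g).map Prod.snd = g.flatten := by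
  induction g generalizing r with
  | nil => simp [gridFlat]
  | cons x g ih => simp [gridFlat, rowFlat_map_snd, ih]

lemma a1_append (l l' : List Int) (t : Int) : a1 t (l ++ l') = a1 (a1 t l) l' := by
  simp [a1, List.foldl_append]

lemma temp_eq (g : List (List Int)) (t : Int) : g.foldl a1 t = a1 t g.flatten := by
  induction g generalizing t with
  | nil => simp [a1]
  | cons x g ih => simp [List.foldl, ih, a1_append]

-- A's second pass = a2s-fold over the flat grid
lemma innerA_fst (m : Int) (x : List Int) (s : Int × Int × Option (Int × Int)) :
    (x.foldl (innerA m) s).1 = s.1 := by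
  induction x generalizing s with
  | nil => rfl
  | cons y x ih => simp [List.foldl, ih, innerA]

lemma innerA_coord (m : Int) (x : List Int) (r c : Int) (co : Option (Int × Int)) :
    (x.foldl (innerA m) (r, c, co)).2.2 = (rowFlat r c x).foldl (a2s m) co := by
  induction x generalizing c co with
  | nil => rfl
  | cons y x ih => simp [List.foldl, innerA, rowFlat, ih, a2s]

lemma outerA_coord (m : Int) (g : List (List Int)) (r : Int) (co : Option (Int × Int)) :
    (g.foldl (outerA m) (r, 0, co)).2.2 = (gridFlat r g).foldl (a2s m) co := by
  induction g generalizing r co with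
  | nil => rfl
  | cons x g ih =>
    simp only [List.foldl, outerA, gridFlat, List.foldl_append]
    rw [innerA_fst, innerA_coord, ih]

-- B's enumerate folds = bstep-fold over the flat grid
lemma enumRow (x : List Int) (r c : Int) (s : Int × Option (Int × Int)) :
    (PySem.List.enumerate x c).foldl (fun s cy => bstep s ((r, cy.1), cy.2)) s =
      (rowFlat r c x).foldl bstep s := by
  induction x generalizing c s with
  | nil => rfl
  | cons y x ih =>
    rw [PySem.List.enumerate_cons]
    simp only [List.foldl, rowFlat]
    exact ih (c + 1) _

lemma enumGrid (g : List (List Int)) (r : Int) (s : Int × Option (Int × Int)) :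
    (PySem.List.enumerate g r).foldl
        (fun s rx => (PySem.List.enumerate rx.2 0).foldl
          (fun s cy => bstep s ((rx.1, cy.1), cy.2)) s) s =
      (gridFlat r g).foldl bstep s := by
  induction g generalizing r s with
  | nil => rfl
  | cons x g ih =>
    rw [PySem.List.enumerate_cons]
    simp only [List.foldl, gridFlat, List.foldl_append]
    rw [enumRow, ih]

-- ===== VERDICT (by name: the statement is the Claim_ definition above) =====
theorem global_max_spec : Claim_equal_global_max := by
  intro g _ _
  show global_max g = global_max_alt g
  simp only [global_max, global_max_alt]
  rw [enumGrid, key, temp_eq, ← gridFlat_map_snd g 0, outerA_coord]
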